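-- pv_equiv track=rewrite | github.com/Sudhansan5/InterviewBit-Solution-Python | Maths/Maths II/nth_magic_number.py | Solve
-- ===== SOURCE A (Python) =====
-- def Solve(A):
--     power = 1
--     ans = 0
--     while A:
--         power *= 5
--         if A%2 == 1:
--             ans += power
--
--         A //= 2
--     return ans
-- ===== SOURCE B (Python) =====
-- def Solve(A):
--     return 5 * int(bin(A)[2:], 5)
-- ===== Notes on version B (the rewrite author's own statement) =====
-- stated objective: simpler
-- what changed: Replaces the explicit bit-loop with power accumulator by a one-line closed form: read A's binary digit string as a base-5 numeral and multiply by 5.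
import Mathlib
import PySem

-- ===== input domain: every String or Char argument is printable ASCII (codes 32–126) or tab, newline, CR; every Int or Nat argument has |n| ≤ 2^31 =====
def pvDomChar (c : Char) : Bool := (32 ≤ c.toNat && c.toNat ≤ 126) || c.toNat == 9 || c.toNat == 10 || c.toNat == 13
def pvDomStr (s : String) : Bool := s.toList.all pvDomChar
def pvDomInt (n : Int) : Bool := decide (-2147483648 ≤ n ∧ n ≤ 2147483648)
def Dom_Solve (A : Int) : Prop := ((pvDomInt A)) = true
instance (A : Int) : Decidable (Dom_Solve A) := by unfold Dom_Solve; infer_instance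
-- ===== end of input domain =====

-- B computes the same value by a closed form (binary digits of A read in base 5, times 5)
-- instead of A's explicit loop with a power accumulator; equal on Pre_ (0 ≤ A).

-- ===== PORT A =====
-- A's while-loop over A's bits; on 0 ≤ A, `while A` tests A ≠ 0 and A //= 2 is n / 2 on Nat,
-- so the loop is transcribed over A.toNat. For A < 0 the Python loop never terminates
-- (A //= 2 never reaches 0 from -1), so the port returns the arbitrary marker -1 there;
-- Pre_ excludes exactly those inputs.
def solveLoop (n : Nat) (power ans : Int) : Int :=
  if n = 0 then ans
  else
    let power' := power * 5
    solveLoop (n / 2) power' (if (n : Int) % 2 == 1 then ans + power' else ans)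
decreasing_by exact Nat.div_lt_self (Nat.pos_of_ne_zero (by assumption)) (by omega)

def Solve (A : Int) : Int := if A < 0 then -1 else solveLoop A.toNat 1 0

-- ===== PORT B =====
-- bin(A)[2:] read as a base-5 numeral: b5 n = 5 * b5 (n/2) + n%2, then multiply by 5.
def b5 (n : Nat) : Int :=
  if n = 0 then 0
  else 5 * b5 (n / 2) + (n % 2 : Nat)
decreasing_by exact Nat.div_lt_self (Nat.pos_of_ne_zero (by assumption)) (by omega)

def Solve_alt (A : Int) : Int := 5 * b5 A.toNat

-- ===== PRECONDITION & SPEC =====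
-- Pre_ excludes A < 0, on which the Python A loops forever (A //= 2 never reaches 0 from -1).
def Pre_Solve (A : Int) : Prop := 0 ≤ A
instance (A : Int) : Decidable (Pre_Solve A) := by unfold Pre_Solve; infer_instance
def pvWitness_Solve : Int := (6)
def Spec_Solve (A : Int) (out : Int) : Prop := out = Solve_alt A
instance (A : Int) (out : Int) : Decidable (Spec_Solve A out) := by unfold Spec_Solve; infer_instance

-- ===== CLAIM (what is proved, stated in full; the proofs are below) =====
def Claim_equal_Solve : Prop := ∀ (A : Int), Dom_Solve A → Pre_Solve A → Spec_Solve A (Solve A)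

-- ===== LEMMAS AND PROOFS =====
theorem solveLoop_eq (n : Nat) : ∀ power ans : Int,
    solveLoop n power ans = ans + power * (5 * b5 n) := by
  induction n using Nat.strong_induction_on with
  | _ n ih =>
    intro power ans
    rw [solveLoop, b5]
    by_cases h : n = 0
    · simp [h]
    · simp only [if_neg h]
      rw [ih (n / 2) (Nat.div_lt_self (Nat.pos_of_ne_zero h) (by omega))]
      have h2 : n % 2 = 0 ∨ n % 2 = 1 := Nat.mod_two_eq_zero_or_one n
      rw [show ((n : Int) % 2) = ((n % 2 : Nat) : Int) from (Int.natCast_mod n 2).symm]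
      rcases h2 with h2 | h2 <;> simp [h2] <;> ring

-- ===== VERDICT (by name: the statement is the Claim_ definition above) =====
theorem Solve_spec : Claim_equal_Solve := by
  intro A _ hpre
  unfold Spec_Solve Solve Solve_alt
  rw [if_neg (not_lt.mpr hpre), solveLoop_eq]
  ring
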